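-- pv_equiv track=rewrite | github.com/Newtonian-No/GFR | train_find/networks/vit_seg_modeling_cross_mamba.py | generate_cross_scan_indices
-- ===== SOURCE A (Python) =====
-- def generate_cross_scan_indices(H, W):
--     """
--     生成十字扫描索引：从中心点开始向外围扩散
--     扫描顺序：从中心开始，按照十字形（上、右、下、左）的顺序，一层一层向外扩展
--
--     例如对于5x5的图像，扫描顺序如下：
--     中心(2,2) -> 上(1,2) -> 右(2,3) -> 下(3,2) -> 左(2,1) ->
--     上上(0,2) -> 右右(2,4) -> 下下(4,2) -> 左左(2,0) -> ...
--     然后是对角线方向依次填充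
--     """
--     indices = []
--     visited = set()
--
--     center_h, center_w = H // 2, W // 2
--
--     # 添加中心点
--     indices.append((center_h, center_w))
--     visited.add((center_h, center_w))
--
--     # 从中心向外扩展
--     max_radius = max(H, W)
--
--     for radius in range(1, max_radius):
--         # 按照十字形的四个方向扩展
--         # 上方向
--         for r in range(1, radius + 1):
--             pos = (center_h - r, center_w)
--             if 0 <= pos[0] < H and 0 <= pos[1] < W and pos not in visited:
--                 indices.append(pos)
--                 visited.add(pos)
--
--         # 右方向
--         for r in range(1, radius + 1):
--             pos = (center_h, center_w + r)
--             if 0 <= pos[0] < H and 0 <= pos[1] < W and pos not in visited: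
--                 indices.append(pos)
--                 visited.add(pos)
--
--         # 下方向
--         for r in range(1, radius + 1):
--             pos = (center_h + r, center_w)
--             if 0 <= pos[0] < H and 0 <= pos[1] < W and pos not in visited:
--                 indices.append(pos)
--                 visited.add(pos)
--
--         # 左方向
--         for r in range(1, radius + 1):
--             pos = (center_h, center_w - r)
--             if 0 <= pos[0] < H and 0 <= pos[1] < W and pos not in visited:
--                 indices.append(pos)
--                 visited.add(pos)
--
--         # 对角线方向 (右上、右下、左下、左上)
--         for r in range(1, radius + 1):
--             # 右上
--             pos = (center_h - r, center_w + r)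
--             if 0 <= pos[0] < H and 0 <= pos[1] < W and pos not in visited:
--                 indices.append(pos)
--                 visited.add(pos)
--
--             # 右下
--             pos = (center_h + r, center_w + r)
--             if 0 <= pos[0] < H and 0 <= pos[1] < W and pos not in visited:
--                 indices.append(pos)
--                 visited.add(pos)
--
--             # 左下
--             pos = (center_h + r, center_w - r)
--             if 0 <= pos[0] < H and 0 <= pos[1] < W and pos not in visited:
--                 indices.append(pos)
--                 visited.add(pos)
--
--             # 左上
--             pos = (center_h - r, center_w - r)
--             if 0 <= pos[0] < H and 0 <= pos[1] < W and pos not in visited: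
--                 indices.append(pos)
--                 visited.add(pos)
--
--         # 填充该层的其他位置（按照菱形/十字扩展的方式）
--         for i in range(-radius, radius + 1):
--             for j in range(-radius, radius + 1):
--                 pos = (center_h + i, center_w + j)
--                 if 0 <= pos[0] < H and 0 <= pos[1] < W and pos not in visited:
--                     indices.append(pos)
--                     visited.add(pos)
--
--     # 转换为一维索引
--     flat_indices = [i * W + j for (i, j) in indices]
--     return flat_indices
-- ===== SOURCE B (Python) =====
-- def generate_cross_scan_indices(H, W):
--     """Center-out scan: per radius, visit only the ring (Chebyshev distance == radius)
--     instead of re-scanning the whole square; emits identical order to the naive version."""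
--     ch, cw = H // 2, W // 2
--     out = [ch * W + cw]  # the scan starts at the center
--
--     def emit(i, j):
--         if 0 <= i < H and 0 <= j < W:
--             out.append(i * W + j)
--
--     for rad in range(1, max(H, W)):
--         # cross tips: up, right, down, left
--         emit(ch - rad, cw)
--         emit(ch, cw + rad)
--         emit(ch + rad, cw)
--         emit(ch, cw - rad)
--         # diagonal tips: up-right, down-right, down-left, up-left
--         emit(ch - rad, cw + rad)
--         emit(ch + rad, cw + rad)
--         emit(ch + rad, cw - rad)
--         emit(ch - rad, cw - rad)
--         # rest of the ring, row-major: top row, side columns, bottom row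
--         for j in range(-rad + 1, rad):
--             if j != 0:
--                 emit(ch - rad, cw + j)
--         for i in range(-rad + 1, rad):
--             if i != 0:
--                 emit(ch + i, cw - rad)
--                 emit(ch + i, cw + rad)
--         for j in range(-rad + 1, rad):
--             if j != 0:
--                 emit(ch + rad, cw + j)
--     return out
-- ===== Notes on version B (the rewrite author's own statement) =====
-- stated objective: faster
-- what changed: B emits, per radius r, only the ring of Chebyshev distance exactly r (eight tips, then the row-major ring remainder) using a pure bounds check, instead of A's per-radius re-scan of four whole arms, whole diagonals and the full (2r+1)x(2r+1) square deduplicated through a visited set.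
import Mathlib
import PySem

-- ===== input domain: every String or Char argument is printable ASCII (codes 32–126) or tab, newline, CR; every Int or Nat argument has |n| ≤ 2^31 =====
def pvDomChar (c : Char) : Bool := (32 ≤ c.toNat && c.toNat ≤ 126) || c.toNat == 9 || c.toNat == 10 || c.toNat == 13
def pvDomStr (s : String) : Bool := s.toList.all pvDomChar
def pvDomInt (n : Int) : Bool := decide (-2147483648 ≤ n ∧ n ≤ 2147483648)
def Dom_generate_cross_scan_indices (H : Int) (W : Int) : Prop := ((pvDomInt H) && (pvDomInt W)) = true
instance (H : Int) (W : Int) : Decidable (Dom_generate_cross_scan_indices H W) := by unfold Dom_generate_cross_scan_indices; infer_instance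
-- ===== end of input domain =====

-- B scans only the ring of Chebyshev distance == radius per iteration instead of A's full-square
-- rescan with a visited set (objective: faster; same return value on every input).


-- ===== PORT A =====
-- one conditional "bounds-check + visited-check, append and mark" step, used by every loop of A
def pvAStep (H W : Int) (st : List (Int × Int) × PySem.Set (Int × Int)) (pos : Int × Int) :
    List (Int × Int) × PySem.Set (Int × Int) :=
  if 0 ≤ pos.1 ∧ pos.1 < H ∧ 0 ≤ pos.2 ∧ pos.2 < W ∧ pos ∉ st.2 then
    (st.1 ++ [pos], PySem.Set.add st.2 pos)
  else st

-- the body of A's `for radius in range(1, max_radius)` loop, transliterated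
def pvABody (H W ch cw : Int) (st0 : List (Int × Int) × PySem.Set (Int × Int)) (radius : Int) :
    List (Int × Int) × PySem.Set (Int × Int) :=
  let st := (PySem.List.pyRange 1 (radius + 1) 1).foldl
    (fun st r => pvAStep H W st (ch - r, cw)) st0
  let st := (PySem.List.pyRange 1 (radius + 1) 1).foldl
    (fun st r => pvAStep H W st (ch, cw + r)) st
  let st := (PySem.List.pyRange 1 (radius + 1) 1).foldl
    (fun st r => pvAStep H W st (ch + r, cw)) st
  let st := (PySem.List.pyRange 1 (radius + 1) 1).foldl
    (fun st r => pvAStep H W st (ch, cw - r)) st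
  let st := (PySem.List.pyRange 1 (radius + 1) 1).foldl
    (fun st r =>
      pvAStep H W (pvAStep H W (pvAStep H W (pvAStep H W st
        (ch - r, cw + r)) (ch + r, cw + r)) (ch + r, cw - r)) (ch - r, cw - r)) st
  (PySem.List.pyRange (-radius) (radius + 1) 1).foldl (fun st i =>
    (PySem.List.pyRange (-radius) (radius + 1) 1).foldl
      (fun st j => pvAStep H W st (ch + i, cw + j)) st) st

def generate_cross_scan_indices (H : Int) (W : Int) : List Int :=
  let center_h := PySem.Int.floordiv H 2
  let center_w := PySem.Int.floordiv W 2
  let st0 : List (Int × Int) × PySem.Set (Int × Int) :=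
    ([(center_h, center_w)], PySem.Set.add PySem.Set.empty (center_h, center_w))
  let max_radius := max H W
  let st := (PySem.List.pyRange 1 max_radius 1).foldl (pvABody H W center_h center_w) st0
  st.1.map (fun p => p.1 * W + p.2)

-- ===== PORT B =====
-- Source B's emit(i, j): append the flat index if (i, j) is inside the grid
def pvEmit (H W : Int) (out : List Int) (i j : Int) : List Int :=
  if 0 ≤ i ∧ i < H ∧ 0 ≤ j ∧ j < W then out ++ [i * W + j] else out

-- the body of Source B's `for rad in range(1, max(H, W))` loop, transliterated
def pvBBody (H W ch cw : Int) (out0 : List Int) (rad : Int) : List Int :=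
  let out := pvEmit H W out0 (ch - rad) cw
  let out := pvEmit H W out ch (cw + rad)
  let out := pvEmit H W out (ch + rad) cw
  let out := pvEmit H W out ch (cw - rad)
  let out := pvEmit H W out (ch - rad) (cw + rad)
  let out := pvEmit H W out (ch + rad) (cw + rad)
  let out := pvEmit H W out (ch + rad) (cw - rad)
  let out := pvEmit H W out (ch - rad) (cw - rad)
  let out := (PySem.List.pyRange (-rad + 1) rad 1).foldl
    (fun out j => if j ≠ 0 then pvEmit H W out (ch - rad) (cw + j) else out) out
  let out := (PySem.List.pyRange (-rad + 1) rad 1).foldl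
    (fun out i => if i ≠ 0 then
        pvEmit H W (pvEmit H W out (ch + i) (cw - rad)) (ch + i) (cw + rad) else out) out
  (PySem.List.pyRange (-rad + 1) rad 1).foldl
    (fun out j => if j ≠ 0 then pvEmit H W out (ch + rad) (cw + j) else out) out

def generate_cross_scan_indices_alt (H : Int) (W : Int) : List Int :=
  let ch := PySem.Int.floordiv H 2
  let cw := PySem.Int.floordiv W 2
  let out : List Int := [ch * W + cw]
  (PySem.List.pyRange 1 (max H W) 1).foldl (pvBBody H W ch cw) out

-- ===== PRECONDITION & SPEC =====
def Spec_generate_cross_scan_indices (H : Int) (W : Int) (out : List Int) : Prop :=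
  out = generate_cross_scan_indices_alt H W
instance (H : Int) (W : Int) (out : List Int) : Decidable (Spec_generate_cross_scan_indices H W out) := by
  unfold Spec_generate_cross_scan_indices; infer_instance

-- ===== CLAIM (what is proved, stated in full; the proofs are below) =====
def Claim_equal_generate_cross_scan_indices : Prop := ∀ (H : Int) (W : Int), Dom_generate_cross_scan_indices H W → Spec_generate_cross_scan_indices H W (generate_cross_scan_indices H W)

-- ===== LEMMAS AND PROOFS =====

-- ---- generic fold lemmas ----
lemma pv_foldl_noop {α β : Type} (f : α → β → α) :
    ∀ (l : List β) (a : α), (∀ b ∈ l, f a b = a) → l.foldl f a = a := by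
  intro l
  induction l with
  | nil => intro a _; rfl
  | cons b tl ih =>
    intro a h
    have hb : f a b = a := h b (by simp)
    simp only [List.foldl_cons, hb]
    exact ih a (fun x hx => h x (by simp [hx]))

lemma pv_foldl_inv {α β : Type} (inv : α → Prop) (f : α → β → α) :
    ∀ (l : List β) (a : α), inv a → (∀ a b, b ∈ l → inv a → inv (f a b)) → inv (l.foldl f a) := by
  intro l
  induction l with
  | nil => intro a ha _; exact ha
  | cons b tl ih =>
    intro a ha h
    exact ih (f a b) (h a b (by simp) ha) (fun a' b' hb' => h a' b' (by simp [hb']))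

lemma pv_foldl_congr_inv {α β : Type} (inv : α → Prop) (f g : α → β → α) :
    ∀ (l : List β) (a : α), inv a → (∀ a b, b ∈ l → inv a → inv (g a b)) →
      (∀ a b, b ∈ l → inv a → f a b = g a b) → l.foldl f a = l.foldl g a := by
  intro l
  induction l with
  | nil => intro a _ _ _; rfl
  | cons b tl ih =>
    intro a ha hg hfg
    have hb : f a b = g a b := hfg a b (by simp) ha
    simp only [List.foldl_cons, hb]
    exact ih (g a b) (hg a b (by simp) ha) (fun a' b' hb' => hg a' b' (by simp [hb']))
      (fun a' b' hb' => hfg a' b' (by simp [hb']))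

lemma pv_foldl_skip {α β : Type} (inv : α → Prop) (f : α → β → α) (p : β → Bool) :
    ∀ (l : List β) (a : α), inv a → (∀ a b, b ∈ l → inv a → inv (f a b)) →
      (∀ a b, b ∈ l → inv a → p b = false → f a b = a) →
      l.foldl f a = (l.filter p).foldl f a := by
  intro l
  induction l with
  | nil => intro a _ _ _; rfl
  | cons b tl ih =>
    intro a ha hinv hskip
    by_cases hp : p b = true
    · simp only [List.foldl_cons, List.filter_cons, hp, if_pos trivial]
      exact ih (f a b) (hinv a b (by simp) ha) (fun a' b' hb' => hinv a' b' (by simp [hb']))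
        (fun a' b' hb' => hskip a' b' (by simp [hb']))
    · have hpf : p b = false := by revert hp; cases p b <;> simp
      have hb : f a b = a := hskip a b (by simp) ha hpf
      simp only [List.foldl_cons, List.filter_cons, hpf, hb]
      simp only [Bool.false_eq_true, if_false]
      exact ih a ha (fun a' b' hb' => hinv a' b' (by simp [hb']))
        (fun a' b' hb' => hskip a' b' (by simp [hb']))

lemma pv_foldl_guard {α β : Type} (q : β → Prop) [DecidablePred q] (f : α → β → α) :
    ∀ (l : List β) (a : α),
      l.foldl (fun x b => if q b then f x b else x) a = (l.filter (fun b => decide (q b))).foldl f a := by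
  intro l
  induction l with
  | nil => intro a; rfl
  | cons b tl ih =>
    intro a
    by_cases hq : q b <;> simp [hq, ih]

lemma pv_flatMap_congr {α β : Type} (f g : β → List α) :
    ∀ (l : List β), (∀ b ∈ l, f b = g b) → l.flatMap f = l.flatMap g := by
  intro l
  induction l with
  | nil => intro _; rfl
  | cons b tl ih =>
    intro h
    simp only [List.flatMap_cons, h b (by simp), ih (fun x hx => h x (by simp [hx]))]

lemma pv_flatMap_rows {α β : Type} (q : β → Prop) [DecidablePred q] (g : β → List α) :
    ∀ (l : List β),
      (l.flatMap fun b => if q b then g b else []) = (l.filter (fun b => decide (q b))).flatMap g := by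
  intro l
  induction l with
  | nil => rfl
  | cons b tl ih =>
    by_cases hq : q b <;> simp [hq, ih]

-- ---- grid / ring vocabulary ----
def pvInP (H W : Int) (p : Int × Int) : Prop := 0 ≤ p.1 ∧ p.1 < H ∧ 0 ≤ p.2 ∧ p.2 < W
def pvInb (H W : Int) (p : Int × Int) : Bool :=
  decide (0 ≤ p.1 ∧ p.1 < H ∧ 0 ≤ p.2 ∧ p.2 < W)
def pvFlat (W : Int) (p : Int × Int) : Int := p.1 * W + p.2
def pvNear (ch cw n : Int) (p : Int × Int) : Prop :=
  ch - n ≤ p.1 ∧ p.1 ≤ ch + n ∧ cw - n ≤ p.2 ∧ p.2 ≤ cw + n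

lemma pvInb_iff (H W : Int) (p : Int × Int) : pvInb H W p = true ↔ pvInP H W p := by
  simp [pvInb, pvInP]

lemma pv_in_mk (H W x y : Int) : pvInP H W (x, y) ↔ (0 ≤ x ∧ x < H ∧ 0 ≤ y ∧ y < W) := by
  simp [pvInP]

lemma pv_near_mk (ch cw n x y : Int) :
    pvNear ch cw n (x, y) ↔ (ch - n ≤ x ∧ x ≤ ch + n ∧ cw - n ≤ y ∧ y ≤ cw + n) := by
  simp [pvNear]

lemma pv_foldl_map {α β γ : Type} (g : β → γ) (f : α → γ → α) :
    ∀ (l : List β) (a : α), (l.map g).foldl f a = l.foldl (fun x y => f x (g y)) a := by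
  intro l
  induction l with
  | nil => intro a; rfl
  | cons b tl ih => intro a; simp only [List.map_cons, List.foldl_cons]; exact ih _

def pvTips (ch cw ρ : Int) : List (Int × Int) :=
  [(ch - ρ, cw), (ch, cw + ρ), (ch + ρ, cw), (ch, cw - ρ),
   (ch - ρ, cw + ρ), (ch + ρ, cw + ρ), (ch + ρ, cw - ρ), (ch - ρ, cw - ρ)]

def pvRow (ch cw ρ i : Int) : List (Int × Int) :=
  if i = -ρ ∨ i = ρ then
    ((PySem.List.pyRange (-ρ + 1) ρ 1).filter (fun j => decide (j ≠ 0))).map (fun j => (ch + i, cw + j))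
  else if i = 0 then []
  else [(ch + i, cw - ρ), (ch + i, cw + ρ)]

def pvRest (ch cw ρ : Int) : List (Int × Int) :=
  (PySem.List.pyRange (-ρ) (ρ + 1) 1).flatMap (pvRow ch cw ρ)

def pvRing (ch cw ρ : Int) : List (Int × Int) := pvTips ch cw ρ ++ pvRest ch cw ρ

-- ---- membership characterizations ----
lemma pv_mem_tips (ch cw ρ : Int) (p : Int × Int) :
    p ∈ pvTips ch cw ρ ↔
      (p.1 = ch - ρ ∧ p.2 = cw) ∨ (p.1 = ch ∧ p.2 = cw + ρ) ∨ (p.1 = ch + ρ ∧ p.2 = cw) ∨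
      (p.1 = ch ∧ p.2 = cw - ρ) ∨ (p.1 = ch - ρ ∧ p.2 = cw + ρ) ∨ (p.1 = ch + ρ ∧ p.2 = cw + ρ) ∨
      (p.1 = ch + ρ ∧ p.2 = cw - ρ) ∨ (p.1 = ch - ρ ∧ p.2 = cw - ρ) := by
  simp [pvTips, Prod.ext_iff]

lemma pv_tips_mem_mk (ch cw ρ x y : Int) :
    ((x, y) ∈ pvTips ch cw ρ) ↔
      (x = ch - ρ ∧ y = cw) ∨ (x = ch ∧ y = cw + ρ) ∨ (x = ch + ρ ∧ y = cw) ∨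
      (x = ch ∧ y = cw - ρ) ∨ (x = ch - ρ ∧ y = cw + ρ) ∨ (x = ch + ρ ∧ y = cw + ρ) ∨
      (x = ch + ρ ∧ y = cw - ρ) ∨ (x = ch - ρ ∧ y = cw - ρ) := by
  simp [pvTips, Prod.ext_iff]

lemma pv_mem_row (ch cw ρ i : Int) (hρ : 1 ≤ ρ) (hi1 : -ρ ≤ i) (hi2 : i ≤ ρ) (p : Int × Int) :
    p ∈ pvRow ch cw ρ i ↔ p.1 = ch + i ∧
      (((i = -ρ ∨ i = ρ) ∧ cw - ρ < p.2 ∧ p.2 < cw + ρ ∧ p.2 ≠ cw) ∨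
       (i ≠ -ρ ∧ i ≠ ρ ∧ i ≠ 0 ∧ (p.2 = cw - ρ ∨ p.2 = cw + ρ))) := by
  unfold pvRow
  split_ifs with h1 h2
  · simp only [List.mem_map, List.mem_filter, PySem.List.mem_pyRange_one, Prod.ext_iff]
    constructor
    · rintro ⟨j, ⟨⟨hj1, hj2⟩, hj0⟩, hx, hy⟩
      simp only [decide_eq_true_eq] at hj0
      omega
    · rintro ⟨hx, h⟩
      refine ⟨p.2 - cw, ⟨⟨by omega, by omega⟩, by simp; omega⟩, by omega, by omega⟩
  · simp; omega
  · simp only [List.mem_cons, List.not_mem_nil, or_false, Prod.ext_iff]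
    omega

lemma pv_mem_rest (ch cw ρ : Int) (hρ : 1 ≤ ρ) (p : Int × Int) :
    p ∈ pvRest ch cw ρ ↔
      ((p.1 = ch - ρ ∨ p.1 = ch + ρ) ∧ (cw - ρ < p.2 ∧ p.2 < cw + ρ ∧ p.2 ≠ cw)) ∨
      ((ch - ρ < p.1 ∧ p.1 < ch + ρ ∧ p.1 ≠ ch) ∧ (p.2 = cw - ρ ∨ p.2 = cw + ρ)) := by
  unfold pvRest
  rw [List.mem_flatMap]
  constructor
  · rintro ⟨i, hi, hp⟩
    rw [PySem.List.mem_pyRange_one] at hi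
    rw [pv_mem_row ch cw ρ i hρ (by omega) (by omega)] at hp
    omega
  · intro h
    refine ⟨p.1 - ch, ?_, ?_⟩
    · rw [PySem.List.mem_pyRange_one]; omega
    · rw [pv_mem_row ch cw ρ _ hρ (by omega) (by omega)]; omega

lemma pv_mem_ring (ch cw ρ : Int) (hρ : 1 ≤ ρ) (p : Int × Int) :
    p ∈ pvRing ch cw ρ ↔ (pvNear ch cw ρ p ∧ ¬ pvNear ch cw (ρ - 1) p) := by
  unfold pvRing pvNear
  rw [List.mem_append, pv_mem_tips, pv_mem_rest ch cw ρ hρ]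
  omega

-- ---- nodup of the ring ----
lemma pv_row_fst (ch cw ρ i : Int) : ∀ p ∈ pvRow ch cw ρ i, p.1 = ch + i := by
  unfold pvRow
  split_ifs with h1 h2 <;> intro p hp
  · simp only [List.mem_map] at hp
    obtain ⟨j, _, hj⟩ := hp
    simp [← hj]
  · simp at hp
  · simp only [List.mem_cons, List.not_mem_nil, or_false] at hp
    rcases hp with h | h <;> simp [h]

lemma pv_nodup_flatMap {α β : Type} [DecidableEq α] (g : β → List α) :
    ∀ (l : List β), l.Nodup → (∀ b ∈ l, (g b).Nodup) →
      (∀ b₁ ∈ l, ∀ b₂ ∈ l, b₁ ≠ b₂ → ∀ x ∈ g b₁, x ∉ g b₂) → (l.flatMap g).Nodup := by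
  intro l
  induction l with
  | nil => intro _ _ _; simp
  | cons b tl ih =>
    intro hnd hg hdisj
    rw [List.flatMap_cons]
    have hb : b ∉ tl := (List.nodup_cons.mp hnd).1
    apply List.Nodup.append
    · exact hg b (by simp)
    · exact ih (List.nodup_cons.mp hnd).2 (fun x hx => hg x (by simp [hx]))
        (fun b₁ h₁ b₂ h₂ hne => hdisj b₁ (by simp [h₁]) b₂ (by simp [h₂]) hne)
    · intro x hx hx'
      rw [List.mem_flatMap] at hx'
      obtain ⟨b₂, hb₂, hxb₂⟩ := hx'
      exact hdisj b (by simp) b₂ (by simp [hb₂]) (fun he => hb (he ▸ hb₂)) x hx hxb₂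

lemma pv_nodup_row (ch cw ρ i : Int) (hρ : 1 ≤ ρ) : (pvRow ch cw ρ i).Nodup := by
  unfold pvRow
  split_ifs with h1 h2
  · apply List.Nodup.map_on
    · intro x _ y _ hxy
      have : cw + x = cw + y := congrArg Prod.snd hxy
      omega
    · exact List.Nodup.filter _ (PySem.List.nodup_pyRange_one (-ρ + 1) ρ)
  · simp
  · refine List.nodup_cons.mpr ⟨?_, List.nodup_cons.mpr ⟨by simp, List.nodup_nil⟩⟩
    intro hmem
    simp only [List.mem_cons, List.not_mem_nil, or_false, Prod.mk.injEq] at hmem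
    omega

lemma pv_nodup_rest (ch cw ρ : Int) (hρ : 1 ≤ ρ) : (pvRest ch cw ρ).Nodup := by
  unfold pvRest
  apply pv_nodup_flatMap
  · exact PySem.List.nodup_pyRange_one _ _
  · intro i _; exact pv_nodup_row ch cw ρ i hρ
  · intro i₁ _ i₂ _ hne x hx hx'
    have h1 := pv_row_fst ch cw ρ i₁ x hx
    have h2 := pv_row_fst ch cw ρ i₂ x hx'
    omega

lemma pv_nodup_tips (ch cw ρ : Int) (hρ : 1 ≤ ρ) : (pvTips ch cw ρ).Nodup := by
  simp only [pvTips, List.nodup_cons, List.mem_cons, List.not_mem_nil, or_false,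
    List.nodup_nil, and_true, not_or, Prod.mk.injEq, not_and, true_implies, not_false_eq_true]
  omega

lemma pv_nodup_ring (ch cw ρ : Int) (hρ : 1 ≤ ρ) : (pvRing ch cw ρ).Nodup := by
  apply List.Nodup.append (pv_nodup_tips ch cw ρ hρ) (pv_nodup_rest ch cw ρ hρ)
  intro p hp hp'
  rw [pv_mem_tips] at hp
  rw [pv_mem_rest ch cw ρ hρ] at hp'
  omega

-- ---- simulation lemmas ----
lemma pvAStep_mem_mono (H W : Int) (st : List (Int × Int) × PySem.Set (Int × Int))
    (pos q : Int × Int) (hq : q ∈ st.2) : q ∈ (pvAStep H W st pos).2 := by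
  unfold pvAStep
  split_ifs with h
  · simp only [PySem.Set.mem_add]; exact Or.inl hq
  · exact hq

lemma pvAStep_noop (H W : Int) (st : List (Int × Int) × PySem.Set (Int × Int))
    (pos : Int × Int) (h : pvInP H W pos → pos ∈ st.2) : pvAStep H W st pos = st := by
  unfold pvAStep
  rw [if_neg]
  rintro ⟨h1, h2, h3, h4, h5⟩
  exact h5 (h ⟨h1, h2, h3, h4⟩)

lemma pv_simA (H W : Int) :
    ∀ (l : List (Int × Int)), l.Nodup → ∀ (ind : List (Int × Int)) (V : PySem.Set (Int × Int)),
      (∀ p ∈ l, p ∉ V) →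
      (l.foldl (pvAStep H W) (ind, V)).1 = ind ++ l.filter (pvInb H W) ∧
      (∀ q, q ∈ (l.foldl (pvAStep H W) (ind, V)).2 ↔ q ∈ V ∨ (q ∈ l ∧ pvInP H W q)) := by
  intro l
  induction l with
  | nil => intro _ ind V _; simp
  | cons p tl ih =>
    intro hnd ind V hfresh
    have hptl : p ∉ tl := (List.nodup_cons.mp hnd).1
    by_cases hin : pvInP H W p
    · have hstep : pvAStep H W (ind, V) p = (ind ++ [p], PySem.Set.add V p) := by
        unfold pvAStep
        rw [if_pos]
        exact ⟨hin.1, hin.2.1, hin.2.2.1, hin.2.2.2, hfresh p (by simp)⟩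
      have hfresh' : ∀ x ∈ tl, x ∉ PySem.Set.add V p := by
        intro x hx hmem
        rw [PySem.Set.mem_add] at hmem
        rcases hmem with h | h
        · exact hfresh x (by simp [hx]) h
        · exact hptl (h ▸ hx)
      obtain ⟨ih1, ih2⟩ := ih (List.nodup_cons.mp hnd).2 (ind ++ [p]) (PySem.Set.add V p) hfresh'
      constructor
      · rw [List.foldl_cons, hstep, ih1, List.filter_cons]
        have : pvInb H W p = true := (pvInb_iff H W p).mpr hin
        simp [this]
      · intro q
        rw [List.foldl_cons, hstep, ih2 q, PySem.Set.mem_add]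
        constructor
        · rintro ((h | h) | ⟨h1, h2⟩)
          · exact Or.inl h
          · exact Or.inr ⟨by simp [h], h ▸ hin⟩
          · exact Or.inr ⟨by simp [h1], h2⟩
        · rintro (h | ⟨h1, h2⟩)
          · exact Or.inl (Or.inl h)
          · rcases List.mem_cons.mp h1 with h | h
            · exact Or.inl (Or.inr h)
            · exact Or.inr ⟨h, h2⟩
    · have hstep : pvAStep H W (ind, V) p = (ind, V) := by
        unfold pvAStep
        rw [if_neg]
        rintro ⟨h1, h2, h3, h4, _⟩
        exact hin ⟨h1, h2, h3, h4⟩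
      obtain ⟨ih1, ih2⟩ := ih (List.nodup_cons.mp hnd).2 ind V (fun x hx => hfresh x (by simp [hx]))
      constructor
      · rw [List.foldl_cons, hstep, ih1, List.filter_cons]
        have : pvInb H W p = false := by
          simp only [pvInb, decide_eq_false_iff_not]; exact hin
        simp [this]
      · intro q
        rw [List.foldl_cons, hstep, ih2 q]
        constructor
        · rintro (h | ⟨h1, h2⟩)
          · exact Or.inl h
          · exact Or.inr ⟨by simp [h1], h2⟩
        · rintro (h | ⟨h1, h2⟩)
          · exact Or.inl h
          · rcases List.mem_cons.mp h1 with h | h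
            · exact absurd h2 (h ▸ hin)
            · exact Or.inr ⟨h, h2⟩

lemma pv_simB (H W : Int) :
    ∀ (l : List (Int × Int)) (out : List Int),
      l.foldl (fun o (p : Int × Int) => pvEmit H W o p.1 p.2) out
        = out ++ (l.filter (pvInb H W)).map (pvFlat W) := by
  intro l
  induction l with
  | nil => intro out; simp
  | cons p tl ih =>
    intro out
    rw [List.foldl_cons, List.filter_cons]
    by_cases hin : pvInP H W p
    · have hb : pvInb H W p = true := (pvInb_iff H W p).mpr hin
      have he : pvEmit H W out p.1 p.2 = out ++ [pvFlat W p] := by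
        unfold pvEmit pvFlat
        rw [if_pos ⟨hin.1, hin.2.1, hin.2.2.1, hin.2.2.2⟩]
      rw [he, ih, hb]
      simp
    · have hb : pvInb H W p = false := by
        simp only [pvInb, decide_eq_false_iff_not]; exact hin
      have he : pvEmit H W out p.1 p.2 = out := by
        unfold pvEmit
        rw [if_neg]
        rintro ⟨h1, h2, h3, h4⟩
        exact hin ⟨h1, h2, h3, h4⟩
      rw [he, ih, hb]
      simp

-- ---- range splitting helpers ----
lemma pv_range_split (ρ : Int) (hρ : 1 ≤ ρ) :
    PySem.List.pyRange (-ρ) (ρ + 1) 1 = -ρ :: (PySem.List.pyRange (-ρ + 1) ρ 1 ++ [ρ]) := by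
  rw [PySem.List.pyRange_one_cons (by omega), PySem.List.pyRange_one_succ_right (by omega)]

lemma pv_cross_range (ρ : Int) (hρ : 1 ≤ ρ) :
    PySem.List.pyRange 1 (ρ + 1) 1 = PySem.List.pyRange 1 ρ 1 ++ [ρ] := by
  rw [PySem.List.pyRange_one_succ_right (by omega)]

lemma pv_filter_mid (ρ : Int) (hρ : 1 ≤ ρ) :
    (PySem.List.pyRange (-ρ) (ρ + 1) 1).filter (fun j => decide (-ρ < j ∧ j < ρ ∧ j ≠ 0))
      = (PySem.List.pyRange (-ρ + 1) ρ 1).filter (fun j => decide (j ≠ 0)) := by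
  rw [pv_range_split ρ hρ]
  rw [List.filter_cons, List.filter_append]
  have h1 : (decide (-ρ < -ρ ∧ -ρ < ρ ∧ -ρ ≠ 0)) = false := by simp
  have h2 : ([ρ].filter (fun j => decide (-ρ < j ∧ j < ρ ∧ j ≠ 0))) = [] := by simp
  rw [h1, h2]
  simp only [Bool.false_eq_true, if_false, List.append_nil]
  apply List.filter_congr
  intro j hj
  rw [PySem.List.mem_pyRange_one] at hj
  simp only [decide_eq_decide]
  omega

lemma pv_filter_ends (ρ : Int) (hρ : 1 ≤ ρ) :
    (PySem.List.pyRange (-ρ) (ρ + 1) 1).filter (fun j => decide (j = -ρ ∨ j = ρ)) = [-ρ, ρ] := by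
  rw [pv_range_split ρ hρ]
  rw [List.filter_cons, List.filter_append]
  have h1 : (decide (-ρ = -ρ ∨ -ρ = ρ)) = true := by simp
  have h2 : ((PySem.List.pyRange (-ρ + 1) ρ 1).filter (fun j => decide (j = -ρ ∨ j = ρ))) = [] := by
    rw [List.filter_eq_nil_iff]
    intro j hj
    rw [PySem.List.mem_pyRange_one] at hj
    simp only [decide_eq_true_eq, not_or]
    omega
  have h3 : ([ρ].filter (fun j => decide (j = -ρ ∨ j = ρ))) = [ρ] := by simp
  rw [h1, h2, h3]
  simp

-- ---- A's per-radius body equals one fold over the ring ----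
lemma pv_cross_fold (H W ch cw ρ : Int) (hρ : 1 ≤ ρ) (pos : Int → Int × Int)
    (st : List (Int × Int) × PySem.Set (Int × Int))
    (hP : ∀ q, pvInP H W q → pvNear ch cw (ρ - 1) q → q ∈ st.2)
    (hpos : ∀ r, 1 ≤ r → r < ρ → pvNear ch cw (ρ - 1) (pos r)) :
    (PySem.List.pyRange 1 (ρ + 1) 1).foldl (fun st r => pvAStep H W st (pos r)) st
      = pvAStep H W st (pos ρ) := by
  rw [pv_cross_range ρ hρ, List.foldl_append]
  have hpre : (PySem.List.pyRange 1 ρ 1).foldl (fun st r => pvAStep H W st (pos r)) st = st := by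
    apply pv_foldl_noop
    intro r hr
    rw [PySem.List.mem_pyRange_one] at hr
    exact pvAStep_noop H W st (pos r) (fun hin => hP _ hin (hpos r hr.1 hr.2))
  rw [hpre]
  rfl

lemma pv_diag_fold (H W ch cw ρ : Int) (hρ : 1 ≤ ρ)
    (st : List (Int × Int) × PySem.Set (Int × Int))
    (hP : ∀ q, pvInP H W q → pvNear ch cw (ρ - 1) q → q ∈ st.2) :
    (PySem.List.pyRange 1 (ρ + 1) 1).foldl (fun st r =>
        pvAStep H W (pvAStep H W (pvAStep H W (pvAStep H W st
          (ch - r, cw + r)) (ch + r, cw + r)) (ch + r, cw - r)) (ch - r, cw - r)) st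
      = pvAStep H W (pvAStep H W (pvAStep H W (pvAStep H W st
          (ch - ρ, cw + ρ)) (ch + ρ, cw + ρ)) (ch + ρ, cw - ρ)) (ch - ρ, cw - ρ) := by
  rw [pv_cross_range ρ hρ, List.foldl_append]
  have hpre : (PySem.List.pyRange 1 ρ 1).foldl (fun st r =>
      pvAStep H W (pvAStep H W (pvAStep H W (pvAStep H W st
        (ch - r, cw + r)) (ch + r, cw + r)) (ch + r, cw - r)) (ch - r, cw - r)) st = st := by
    apply pv_foldl_noop
    intro r hr
    rw [PySem.List.mem_pyRange_one] at hr
    have h1 : pvAStep H W st (ch - r, cw + r) = st :=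
      pvAStep_noop H W st _ (fun hin => hP _ hin (by rw [pv_near_mk]; omega))
    rw [h1]
    have h2 : pvAStep H W st (ch + r, cw + r) = st :=
      pvAStep_noop H W st _ (fun hin => hP _ hin (by rw [pv_near_mk]; omega))
    rw [h2]
    have h3 : pvAStep H W st (ch + r, cw - r) = st :=
      pvAStep_noop H W st _ (fun hin => hP _ hin (by rw [pv_near_mk]; omega))
    rw [h3]
    exact pvAStep_noop H W st _ (fun hin => hP _ hin (by rw [pv_near_mk]; omega))
  rw [hpre]
  rfl

lemma pv_double_fold (H W ch cw ρ : Int) (hρ : 1 ≤ ρ)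
    (st : List (Int × Int) × PySem.Set (Int × Int))
    (hP : ∀ q, pvInP H W q → pvNear ch cw (ρ - 1) q → q ∈ st.2)
    (hT : ∀ q ∈ pvTips ch cw ρ, pvInP H W q → q ∈ st.2) :
    (PySem.List.pyRange (-ρ) (ρ + 1) 1).foldl (fun st i =>
        (PySem.List.pyRange (-ρ) (ρ + 1) 1).foldl
          (fun st j => pvAStep H W st (ch + i, cw + j)) st) st
      = (pvRest ch cw ρ).foldl (pvAStep H W) st := by
  unfold pvRest
  rw [List.foldl_flatMap]
  set inv : List (Int × Int) × PySem.Set (Int × Int) → Prop := fun s =>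
    (∀ q, pvInP H W q → pvNear ch cw (ρ - 1) q → q ∈ s.2) ∧
    (∀ q ∈ pvTips ch cw ρ, pvInP H W q → q ∈ s.2) with hinv_def
  have hstep_inv : ∀ s pos, inv s → inv (pvAStep H W s pos) := by
    rintro s pos ⟨hs1, hs2⟩
    exact ⟨fun q h1 h2 => pvAStep_mem_mono H W s pos q (hs1 q h1 h2),
           fun q hq h1 => pvAStep_mem_mono H W s pos q (hs2 q hq h1)⟩
  apply pv_foldl_congr_inv inv
  · exact ⟨hP, hT⟩
  · intro s i _ hs
    apply pv_foldl_inv inv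
    · exact hs
    · intro s' p _ hs'
      exact hstep_inv s' p hs'
  · intro s i hi hs
    rw [PySem.List.mem_pyRange_one] at hi
    have hs1 : ∀ q, pvInP H W q → pvNear ch cw (ρ - 1) q → q ∈ s.2 := hs.1
    have hs2 : ∀ q ∈ pvTips ch cw ρ, pvInP H W q → q ∈ s.2 := hs.2
    by_cases hedge : i = -ρ ∨ i = ρ
    · -- top or bottom row: keep exactly the interior non-axis columns
      have hskip := pv_foldl_skip inv (fun st j => pvAStep H W st (ch + i, cw + j))
        (fun j => decide (-ρ < j ∧ j < ρ ∧ j ≠ 0)) (PySem.List.pyRange (-ρ) (ρ + 1) 1) s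
        hs (fun a b _ ha => hstep_inv a _ ha) ?hskip
      case hskip =>
        intro a j hj ha hfalse
        rw [PySem.List.mem_pyRange_one] at hj
        simp only [decide_eq_false_iff_not] at hfalse
        apply pvAStep_noop
        intro hin
        apply ha.2
        · rw [pv_tips_mem_mk]; omega
        · exact hin
      rw [hskip, pv_filter_mid ρ hρ, ← pv_foldl_map (fun j => ((ch + i : Int), cw + j)) (pvAStep H W)]
      unfold pvRow
      rw [if_pos hedge]
    · by_cases hzero : i = 0
      · -- center row: everything already visited
        have hnoop : (PySem.List.pyRange (-ρ) (ρ + 1) 1).foldl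
            (fun st j => pvAStep H W st (ch + i, cw + j)) s = s := by
          apply pv_foldl_noop
          intro j hj
          rw [PySem.List.mem_pyRange_one] at hj
          apply pvAStep_noop
          intro hin
          by_cases hjedge : j = -ρ ∨ j = ρ
          · apply hs2
            · rw [pv_tips_mem_mk]; omega
            · exact hin
          · exact hs1 _ hin (by rw [pv_near_mk]; omega)
        rw [hnoop]
        unfold pvRow
        rw [if_neg hedge, if_pos hzero]
        rfl
      · -- middle row: keep exactly the two side columns
        have hskip := pv_foldl_skip inv (fun st j => pvAStep H W st (ch + i, cw + j))
          (fun j => decide (j = -ρ ∨ j = ρ)) (PySem.List.pyRange (-ρ) (ρ + 1) 1) s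
          hs (fun a b _ ha => hstep_inv a _ ha) ?hskip2
        case hskip2 =>
          intro a j hj ha hfalse
          rw [PySem.List.mem_pyRange_one] at hj
          simp only [decide_eq_false_iff_not, not_or] at hfalse
          apply pvAStep_noop
          intro hin
          exact ha.1 _ hin (by rw [pv_near_mk]; omega)
        rw [hskip, pv_filter_ends ρ hρ]
        unfold pvRow
        rw [if_neg hedge, if_neg hzero]
        rfl

lemma pvA_radius (H W ch cw ρ : Int) (hρ : 1 ≤ ρ)
    (ind : List (Int × Int)) (V : PySem.Set (Int × Int))
    (hV : ∀ q, q ∈ V ↔ (pvInP H W q ∧ pvNear ch cw (ρ - 1) q)) :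
    pvABody H W ch cw (ind, V) ρ = (pvRing ch cw ρ).foldl (pvAStep H W) (ind, V) := by
  have hP0 : ∀ q, pvInP H W q → pvNear ch cw (ρ - 1) q → q ∈ (ind, V).2 := by
    intro q h1 h2; exact (hV q).mpr ⟨h1, h2⟩
  simp only [pvABody]
  have hPmono : ∀ (s : List (Int × Int) × PySem.Set (Int × Int)) pos,
      (∀ q, pvInP H W q → pvNear ch cw (ρ - 1) q → q ∈ s.2) →
      (∀ q, pvInP H W q → pvNear ch cw (ρ - 1) q → q ∈ (pvAStep H W s pos).2) := by
    intro s pos hs q h1 h2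
    exact pvAStep_mem_mono H W s pos q (hs q h1 h2)
  -- cross arms
  rw [pv_cross_fold H W ch cw ρ hρ (fun r => (ch - r, cw)) (ind, V) hP0
    (fun r h1 h2 => by rw [pv_near_mk]; omega)]
  set s1 := pvAStep H W (ind, V) (ch - ρ, cw) with hs1
  have hP1 := hPmono (ind, V) (ch - ρ, cw) hP0
  rw [pv_cross_fold H W ch cw ρ hρ (fun r => (ch, cw + r)) s1 hP1
    (fun r h1 h2 => by rw [pv_near_mk]; omega)]
  set s2 := pvAStep H W s1 (ch, cw + ρ) with hs2
  have hP2 := hPmono s1 (ch, cw + ρ) hP1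
  rw [pv_cross_fold H W ch cw ρ hρ (fun r => (ch + r, cw)) s2 hP2
    (fun r h1 h2 => by rw [pv_near_mk]; omega)]
  set s3 := pvAStep H W s2 (ch + ρ, cw) with hs3
  have hP3 := hPmono s2 (ch + ρ, cw) hP2
  rw [pv_cross_fold H W ch cw ρ hρ (fun r => (ch, cw - r)) s3 hP3
    (fun r h1 h2 => by rw [pv_near_mk]; omega)]
  set s4 := pvAStep H W s3 (ch, cw - ρ) with hs4
  have hP4 := hPmono s3 (ch, cw - ρ) hP3
  rw [pv_diag_fold H W ch cw ρ hρ s4 hP4]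
  set s8 := pvAStep H W (pvAStep H W (pvAStep H W (pvAStep H W s4
    (ch - ρ, cw + ρ)) (ch + ρ, cw + ρ)) (ch + ρ, cw - ρ)) (ch - ρ, cw - ρ) with hs8
  have hs8fold : s8 = (pvTips ch cw ρ).foldl (pvAStep H W) (ind, V) := by
    simp only [pvTips, List.foldl_cons, List.foldl_nil, hs8, hs4, hs3, hs2, hs1]
  have hP8 : ∀ q, pvInP H W q → pvNear ch cw (ρ - 1) q → q ∈ s8.2 := by
    have h5 := hPmono s4 (ch - ρ, cw + ρ) hP4
    have h6 := hPmono _ (ch + ρ, cw + ρ) h5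
    have h7 := hPmono _ (ch + ρ, cw - ρ) h6
    exact hPmono _ (ch - ρ, cw - ρ) h7
  have hT8 : ∀ q ∈ pvTips ch cw ρ, pvInP H W q → q ∈ s8.2 := by
    have hnd := pv_nodup_tips ch cw ρ hρ
    have hfresh : ∀ p ∈ pvTips ch cw ρ, p ∉ V := by
      intro p hp hpV
      rw [pv_mem_tips] at hp
      have := (hV p).mp hpV
      unfold pvNear at this
      omega
    obtain ⟨_, hchar⟩ := pv_simA H W (pvTips ch cw ρ) hnd ind V hfresh
    intro q hq hin
    rw [hs8fold, hchar q]
    exact Or.inr ⟨hq, hin⟩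
  rw [pv_double_fold H W ch cw ρ hρ s8 hP8 hT8]
  rw [hs8fold, pvRing, List.foldl_append]

lemma pvA_radius' (H W ch cw ρ : Int) (hρ : 1 ≤ ρ)
    (ind : List (Int × Int)) (V : PySem.Set (Int × Int))
    (hV : ∀ q, q ∈ V ↔ (pvInP H W q ∧ pvNear ch cw (ρ - 1) q)) :
    (pvABody H W ch cw (ind, V) ρ).1 = ind ++ (pvRing ch cw ρ).filter (pvInb H W) ∧
    (∀ q, q ∈ (pvABody H W ch cw (ind, V) ρ).2 ↔ (pvInP H W q ∧ pvNear ch cw ρ q)) := by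
  rw [pvA_radius H W ch cw ρ hρ ind V hV]
  have hfresh : ∀ p ∈ pvRing ch cw ρ, p ∉ V := by
    intro p hp hpV
    rw [pv_mem_ring ch cw ρ hρ] at hp
    have := (hV p).mp hpV
    exact hp.2 this.2
  obtain ⟨h1, h2⟩ := pv_simA H W (pvRing ch cw ρ) (pv_nodup_ring ch cw ρ hρ) ind V hfresh
  refine ⟨h1, ?_⟩
  intro q
  rw [h2 q, hV q]
  constructor
  · rintro (⟨hin, hnear⟩ | ⟨hq, hin⟩)
    · refine ⟨hin, ?_⟩
      unfold pvNear at *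
      omega
    · rw [pv_mem_ring ch cw ρ hρ] at hq
      exact ⟨hin, hq.1⟩
  · rintro ⟨hin, hnear⟩
    by_cases hn : pvNear ch cw (ρ - 1) q
    · exact Or.inl ⟨hin, hn⟩
    · exact Or.inr ⟨(pv_mem_ring ch cw ρ hρ q).mpr ⟨hnear, hn⟩, hin⟩

-- ---- B's per-radius body equals one fold over the ring ----
lemma pv_row_mid (ch cw ρ i : Int) (hi1 : -ρ < i) (hi2 : i < ρ) :
    pvRow ch cw ρ i = if i = 0 then [] else [(ch + i, cw - ρ), (ch + i, cw + ρ)] := by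
  unfold pvRow
  rw [if_neg (by omega)]

lemma pv_rest_parts (ch cw ρ : Int) (hρ : 1 ≤ ρ) :
    pvRest ch cw ρ =
      ((PySem.List.pyRange (-ρ + 1) ρ 1).filter (fun j => decide (j ≠ 0))).map
          (fun j => (ch - ρ, cw + j))
      ++ ((PySem.List.pyRange (-ρ + 1) ρ 1).filter (fun i => decide (i ≠ 0))).flatMap
          (fun i => [(ch + i, cw - ρ), (ch + i, cw + ρ)])
      ++ ((PySem.List.pyRange (-ρ + 1) ρ 1).filter (fun j => decide (j ≠ 0))).map
          (fun j => (ch + ρ, cw + j)) := by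
  unfold pvRest
  rw [pv_range_split ρ hρ, List.flatMap_cons, List.flatMap_append]
  have htop : pvRow ch cw ρ (-ρ) = ((PySem.List.pyRange (-ρ + 1) ρ 1).filter
      (fun j => decide (j ≠ 0))).map (fun j => (ch - ρ, cw + j)) := by
    unfold pvRow
    rw [if_pos (Or.inl rfl)]
    rfl
  have hbot : [ρ].flatMap (pvRow ch cw ρ) = ((PySem.List.pyRange (-ρ + 1) ρ 1).filter
      (fun j => decide (j ≠ 0))).map (fun j => (ch + ρ, cw + j)) := by
    simp only [List.flatMap_cons, List.flatMap_nil, List.append_nil]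
    unfold pvRow
    rw [if_pos (Or.inr rfl)]
  have hmid : (PySem.List.pyRange (-ρ + 1) ρ 1).flatMap (pvRow ch cw ρ)
      = ((PySem.List.pyRange (-ρ + 1) ρ 1).filter (fun i => decide (i ≠ 0))).flatMap
          (fun i => [(ch + i, cw - ρ), (ch + i, cw + ρ)]) := by
    rw [← pv_flatMap_rows (fun i => i ≠ 0) (fun i => [(ch + i, cw - ρ), (ch + i, cw + ρ)])]
    apply pv_flatMap_congr
    intro i hi
    rw [PySem.List.mem_pyRange_one] at hi
    rw [pv_row_mid ch cw ρ i (by omega) (by omega)]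
    by_cases h : i = 0 <;> simp [h]
  rw [htop, hmid, hbot, List.append_assoc]

lemma pvB_radius (H W ch cw ρ : Int) (hρ : 1 ≤ ρ) (out : List Int) :
    pvBBody H W ch cw out ρ = out ++ ((pvRing ch cw ρ).filter (pvInb H W)).map (pvFlat W) := by
  simp only [pvBBody]
  rw [pv_foldl_guard (fun (j : Int) => j ≠ 0)
    (fun out j => pvEmit H W out (ch - ρ) (cw + j))]
  rw [pv_foldl_guard (fun (i : Int) => i ≠ 0)
    (fun out i => pvEmit H W (pvEmit H W out (ch + i) (cw - ρ)) (ch + i) (cw + ρ))]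
  rw [pv_foldl_guard (fun (j : Int) => j ≠ 0)
    (fun out j => pvEmit H W out (ch + ρ) (cw + j))]
  rw [← pv_foldl_map (fun j => ((ch - ρ : Int), cw + j))
    (fun o (p : Int × Int) => pvEmit H W o p.1 p.2)]
  rw [← pv_foldl_map (fun j => ((ch + ρ : Int), cw + j))
    (fun o (p : Int × Int) => pvEmit H W o p.1 p.2)]
  rw [show (fun (out : List Int) (i : Int) =>
        pvEmit H W (pvEmit H W out (ch + i) (cw - ρ)) (ch + i) (cw + ρ))
      = (fun (out : List Int) (i : Int) =>
        ([((ch + i : Int), cw - ρ), ((ch + i : Int), cw + ρ)]).foldl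
          (fun o (p : Int × Int) => pvEmit H W o p.1 p.2) out) from rfl]
  rw [← List.foldl_flatMap]
  have htips : pvEmit H W (pvEmit H W (pvEmit H W (pvEmit H W (pvEmit H W (pvEmit H W
        (pvEmit H W (pvEmit H W out (ch - ρ) cw) ch (cw + ρ)) (ch + ρ) cw) ch (cw - ρ))
        (ch - ρ) (cw + ρ)) (ch + ρ) (cw + ρ)) (ch + ρ) (cw - ρ)) (ch - ρ) (cw - ρ)
      = (pvTips ch cw ρ).foldl (fun o (p : Int × Int) => pvEmit H W o p.1 p.2) out := by
    simp only [pvTips, List.foldl_cons, List.foldl_nil]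
  rw [htips]
  simp only [pv_simB]
  rw [pvRing, pv_rest_parts ch cw ρ hρ]
  simp only [List.filter_append, List.map_append, List.append_assoc]

-- ---- main induction over the radii ----
lemma pv_main (H W ch cw : Int) (hch : 0 ≤ ch ∧ ch < H) (hcw : 0 ≤ cw ∧ cw < W) :
    ∀ (n : Nat),
      ((PySem.List.pyRange 1 (1 + (n : Int)) 1).foldl (pvABody H W ch cw)
          ([(ch, cw)], PySem.Set.add PySem.Set.empty (ch, cw))).1.map (fun p => p.1 * W + p.2)
        = (PySem.List.pyRange 1 (1 + (n : Int)) 1).foldl (pvBBody H W ch cw)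
            ([ch * W + cw]) ∧
      (∀ q, q ∈ ((PySem.List.pyRange 1 (1 + (n : Int)) 1).foldl (pvABody H W ch cw)
          ([(ch, cw)], PySem.Set.add PySem.Set.empty (ch, cw))).2
        ↔ (pvInP H W q ∧ pvNear ch cw (n : Int) q)) := by
  intro n
  induction n with
  | zero =>
    have hnil : PySem.List.pyRange 1 (1 + ((0 : Nat) : Int)) 1 = [] := by
      apply PySem.List.pyRange_one_eq_nil; norm_num
    rw [hnil]
    constructor
    · simp
    · intro q
      simp only [List.foldl_nil]
      obtain ⟨x, y⟩ := q
      have hmem : (x, y) ∈ (PySem.Set.add PySem.Set.empty (ch, cw) : PySem.Set (Int × Int))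
          ↔ (x, y) = (ch, cw) := by
        rw [PySem.Set.mem_add]
        simp [PySem.Set.empty]
      rw [hmem, pv_in_mk, pv_near_mk, Prod.mk.injEq]
      omega
  | succ m ih =>
    have hsplit : PySem.List.pyRange 1 (1 + ((m + 1 : Nat) : Int)) 1
        = PySem.List.pyRange 1 (1 + (m : Int)) 1 ++ [1 + (m : Int)] := by
      have : (1 + ((m + 1 : Nat) : Int)) = (1 + (m : Int)) + 1 := by push_cast; ring
      rw [this, PySem.List.pyRange_one_succ_right (by omega)]
    rw [hsplit, List.foldl_append, List.foldl_append]
    obtain ⟨ih1, ih2⟩ := ih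
    set stA := (PySem.List.pyRange 1 (1 + (m : Int)) 1).foldl (pvABody H W ch cw)
      ([(ch, cw)], PySem.Set.add PySem.Set.empty (ch, cw)) with hstA
    set outB := (PySem.List.pyRange 1 (1 + (m : Int)) 1).foldl (pvBBody H W ch cw)
      ([ch * W + cw]) with houtB
    have hρ : 1 ≤ (1 + (m : Int)) := by omega
    have hV : ∀ q, q ∈ stA.2 ↔ (pvInP H W q ∧ pvNear ch cw ((1 + (m : Int)) - 1) q) := by
      intro q
      have : ((1 + (m : Int)) - 1) = (m : Int) := by omega
      rw [this]
      exact ih2 q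
    obtain ⟨hA1, hA2⟩ := pvA_radius' H W ch cw (1 + (m : Int)) hρ stA.1 stA.2 hV
    simp only [List.foldl_cons, List.foldl_nil]
    constructor
    · rw [show (stA.1, stA.2) = stA from rfl] at hA1
      rw [hA1, List.map_append, ih1, pvB_radius H W ch cw (1 + (m : Int)) hρ outB]
      rfl
    · intro q
      rw [show (stA.1, stA.2) = stA from rfl] at hA2
      rw [hA2 q]
      have : ((m + 1 : Nat) : Int) = 1 + (m : Int) := by push_cast; ring
      rw [this]

-- ---- verdict-level helper lemmas ----
lemma pv_center_bounds (H : Int) (hH : 1 ≤ H) :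
    0 ≤ PySem.Int.floordiv H 2 ∧ PySem.Int.floordiv H 2 < H := by
  rw [PySem.Int.floordiv_eq_ediv_of_pos (by norm_num)]
  omega

lemma pv_emit_degenerate (H W : Int) (hD : H ≤ 0 ∨ W ≤ 0) (out : List Int) (i j : Int) :
    pvEmit H W out i j = out := by
  unfold pvEmit
  rw [if_neg]
  rintro ⟨h1, h2, h3, h4⟩
  omega

lemma pv_bbody_degenerate (H W ch cw : Int) (hD : H ≤ 0 ∨ W ≤ 0) (out : List Int) (rad : Int) :
    pvBBody H W ch cw out rad = out := by
  have hid : ∀ (l : List Int) (a : List Int), l.foldl (fun out (_ : Int) => out) a = a :=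
    fun l a => pv_foldl_noop _ l a (fun _ _ => rfl)
  simp only [pvBBody]
  simp only [pv_emit_degenerate H W hD, ite_self]
  simp only [hid]

lemma pvAStep_degenerate (H W : Int) (hD : H ≤ 0 ∨ W ≤ 0)
    (st : List (Int × Int) × PySem.Set (Int × Int)) (pos : Int × Int) :
    pvAStep H W st pos = st := by
  unfold pvAStep
  rw [if_neg]
  rintro ⟨h1, h2, h3, h4, h5⟩
  omega

lemma pv_abody_degenerate (H W ch cw : Int) (hD : H ≤ 0 ∨ W ≤ 0)
    (st : List (Int × Int) × PySem.Set (Int × Int)) (radius : Int) :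
    pvABody H W ch cw st radius = st := by
  have hid : ∀ (l : List Int) (a : List (Int × Int) × PySem.Set (Int × Int)),
      l.foldl (fun st (_ : Int) => st) a = a :=
    fun l a => pv_foldl_noop _ l a (fun _ _ => rfl)
  simp only [pvABody, pvAStep_degenerate H W hD]
  simp only [hid]

-- ===== VERDICT (by name: the statement is the Claim_ definition above) =====
theorem generate_cross_scan_indices_spec : Claim_equal_generate_cross_scan_indices := by
  intro H W _
  unfold Spec_generate_cross_scan_indices
  by_cases hdeg : H ≤ 0 ∨ W ≤ 0
  · -- degenerate grids: every bounds check fails, both sides return just the center index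
    have hA : generate_cross_scan_indices H W
        = [PySem.Int.floordiv H 2 * W + PySem.Int.floordiv W 2] := by
      simp only [generate_cross_scan_indices]
      rw [pv_foldl_noop _ _ _ (fun r _ => pv_abody_degenerate H W _ _ hdeg _ r)]
      simp
    have hB : generate_cross_scan_indices_alt H W
        = [PySem.Int.floordiv H 2 * W + PySem.Int.floordiv W 2] := by
      simp only [generate_cross_scan_indices_alt]
      exact pv_foldl_noop _ _ _ (fun r _ => pv_bbody_degenerate H W _ _ hdeg _ r)
    rw [hA, hB]
  · push_neg at hdeg
    obtain ⟨hH, hW⟩ := hdeg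
    have hch := pv_center_bounds H (by omega)
    have hcw := pv_center_bounds W (by omega)
    have h1M : 1 ≤ max H W := le_trans (by omega : (1:Int) ≤ H) (le_max_left H W)
    obtain ⟨hmain1, -⟩ := pv_main H W (PySem.Int.floordiv H 2) (PySem.Int.floordiv W 2)
      hch hcw (max H W - 1).toNat
    have hn : (1 + (((max H W - 1).toNat : Nat) : Int)) = max H W := by
      set M := max H W
      omega
    rw [hn] at hmain1
    exact hmain1
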